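-- pv_equiv track=rewrite | github.com/zhf101/xagent | src/xagent/core/datamake/application/evidence_budget.py | parse_compact_response
-- ===== SOURCE A (Python) =====
-- def parse_compact_response(response: str) -> list[dict[str, str]]:
--     """
--     解析压缩模型返回的 `SYSTEM: ... / USER: ...` 文本。
--
--     这里仍然容忍 `ASSISTANT:` 前缀，是为了与项目里的通用 compact 约定保持一致，
--     避免未来替换 compact 模型时因格式轻微漂移直接失效。
--     """
--
--     messages: list[dict[str, str]] = []
--     current_role: str | None = None
--     current_content: list[str] = []
--
--     for raw_line in response.splitlines():
--         line = raw_line.strip()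
--         if not line:
--             continue
--         if line.startswith(("SYSTEM:", "USER:", "ASSISTANT:")):
--             if current_role and current_content:
--                 messages.append(
--                     {
--                         "role": current_role.lower(),
--                         "content": "\n".join(current_content),
--                     }
--                 )
--             parts = line.split(":", 1)
--             current_role = parts[0]
--             current_content = [parts[1].strip()] if len(parts) > 1 else []
--         elif current_role:
--             current_content.append(line)
--
--     if current_role and current_content:
--         messages.append(
--             {
--                 "role": current_role.lower(),
--                 "content": "\n".join(current_content),
--             }
--         )
--
--     return messages
-- ===== SOURCE B (Python) =====
-- _HEADS = ("SYSTEM:", "USER:", "ASSISTANT:")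
--
--
-- def _segments(lines: list[str]) -> list[dict[str, str]]:
--     """lines[0] is a header line; slice off its body up to the next header, recurse."""
--     if not lines:
--         return []
--     role, inline = lines[0].split(":", 1)
--     k = 1
--     while k < len(lines) and not lines[k].startswith(_HEADS):
--         k += 1
--     msg = {"role": role.lower(), "content": "\n".join([inline.strip()] + lines[1:k])}
--     return [msg] + _segments(lines[k:])
--
--
-- def parse_compact_response(response: str) -> list[dict[str, str]]:
--     lines = [s for s in map(str.strip, response.splitlines()) if s]
--     while lines and not lines[0].startswith(_HEADS):
--         lines = lines[1:]
--     return _segments(lines)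
-- ===== Notes on version B (the rewrite author's own statement) =====
-- stated objective: alternative
-- what changed: A's single pass with a running role/content accumulator and flush-on-header logic is replaced by a normalise-then-slice decomposition: strip and filter the lines once, drop the prologue before the first header, then recursively split off one header-led segment at a time (header split on the first colon, body = lines up to the next header).
import Mathlib
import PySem

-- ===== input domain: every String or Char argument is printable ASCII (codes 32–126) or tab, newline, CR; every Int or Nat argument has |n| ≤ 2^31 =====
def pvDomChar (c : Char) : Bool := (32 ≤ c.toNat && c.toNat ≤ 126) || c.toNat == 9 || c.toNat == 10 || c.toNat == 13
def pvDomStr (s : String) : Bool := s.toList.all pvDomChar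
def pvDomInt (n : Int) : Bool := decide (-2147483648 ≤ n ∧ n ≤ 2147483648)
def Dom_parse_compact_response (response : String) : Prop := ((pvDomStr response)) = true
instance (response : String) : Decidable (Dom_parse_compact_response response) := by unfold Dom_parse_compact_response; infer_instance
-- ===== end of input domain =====

-- B replaces A's running-accumulator flush loop by a normalise-then-split-off-segments decomposition
-- (strip/filter the lines once, drop the prologue, then recursively slice each header-led segment);
-- same cost, different structure (objective: alternative).

-- ===== PORT A =====
-- shared by both ports: the header test `line.startswith(("SYSTEM:", "USER:", "ASSISTANT:"))`
def pcrIsHead (line : String) : Bool :=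
  PySem.Str.startswith line "SYSTEM:" || PySem.Str.startswith line "USER:" || PySem.Str.startswith line "ASSISTANT:"

-- one iteration of A's `for raw_line in response.splitlines()` loop over the state
-- (messages, current_role, current_content)
def pcrStepA (st : List (List (String × String)) × Option String × List String) (rawLine : String) :
    List (List (String × String)) × Option String × List String :=
  match st with
  | (messages, currentRole, currentContent) =>
    let line := PySem.Str.strip rawLine
    if line = "" then (messages, currentRole, currentContent)
    else if pcrIsHead line then
      -- `parts = line.split(":", 1)`: sep ≠ "" so the split never fails (getD [] is unreachable),
      -- and split always returns a nonempty list so `parts[0]` is `headD ""` exactly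
      let parts := (PySem.Str.splitMax? line ":" 1).getD []
      let newRole := some (parts.headD "")
      let newContent := if 1 < parts.length then [PySem.Str.strip (parts.getD 1 "")] else []
      match currentRole with
      | some r =>
        if r ≠ "" ∧ currentContent ≠ [] then
          (messages ++ [[("role", PySem.Str.lower r), ("content", PySem.Str.join "\n" currentContent)]],
           newRole, newContent)
        else (messages, newRole, newContent)
      | none => (messages, newRole, newContent)
    else
      match currentRole with
      | some r =>
        if r ≠ "" then (messages, currentRole, currentContent ++ [line])
        else (messages, currentRole, currentContent)
      | none => (messages, currentRole, currentContent)

def parse_compact_response (response : String) : List (List (String × String)) :=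
  match (PySem.Str.splitlines response).foldl pcrStepA ([], none, []) with
  | (messages, some r, content) =>
    if r ≠ "" ∧ content ≠ [] then
      messages ++ [[("role", PySem.Str.lower r), ("content", PySem.Str.join "\n" content)]]
    else messages
  | (messages, none, _) => messages

-- ===== PORT B =====
-- the `while k < len(lines) and not lines[k].startswith(_HEADS): k += 1` scan of _segments:
-- (lines[1:k], lines[k:]) = body before the next header, rest from it
def pcrSpan : List String → List String × List String
  | [] => ([], [])
  | l :: ls =>
    if pcrIsHead l then ([], l :: ls)
    else
      let p := pcrSpan ls
      (l :: p.1, p.2)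

-- termination helper for pcrSegments (the recursive call is on lines[k:], a suffix of the tail)
theorem pcrSpan_snd_length (ls : List String) : (pcrSpan ls).2.length ≤ ls.length := by
  induction ls with
  | nil => simp [pcrSpan]
  | cons l ls ih =>
    simp only [pcrSpan]
    split
    · simp
    · simpa using Nat.le_succ_of_le ih

-- Source B's _segments: lines[0] is a header line; emit its message, recurse on lines[k:]
def pcrSegments : List String → List (List (String × String))
  | [] => []
  | h :: t =>
    -- `role, inline = lines[0].split(":", 1)`; the `_` arm is unreachable (every line passed
    -- here starts with "SYSTEM:"/"USER:"/"ASSISTANT:", so the split has exactly two parts)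
    match (PySem.Str.splitMax? h ":" 1).getD [] with
    | [role, inline] =>
      let p := pcrSpan t
      [("role", PySem.Str.lower role),
       ("content", PySem.Str.join "\n" (PySem.Str.strip inline :: p.1))] :: pcrSegments p.2
    | _ => []
  termination_by l => l.length
  decreasing_by exact Nat.lt_succ_of_le (pcrSpan_snd_length t)

-- Source B's prologue loop: `while lines and not lines[0].startswith(_HEADS): lines = lines[1:]`
def pcrDrop : List String → List String
  | [] => []
  | l :: ls => if pcrIsHead l then l :: ls else pcrDrop ls

def parse_compact_response_alt (response : String) : List (List (String × String)) :=
  let lines := ((PySem.Str.splitlines response).map PySem.Str.strip).filter (fun s => s != "")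
  pcrSegments (pcrDrop lines)

-- ===== PRECONDITION & SPEC =====
def Spec_parse_compact_response (response : String) (out : List (List (String × String))) : Prop := out = parse_compact_response_alt response
instance (response : String) (out : List (List (String × String))) : Decidable (Spec_parse_compact_response response out) := by unfold Spec_parse_compact_response; infer_instance

-- ===== CLAIM (what is proved, stated in full; the proofs are below) =====
def Claim_equal_parse_compact_response : Prop := ∀ (response : String), Dom_parse_compact_response response → Spec_parse_compact_response response (parse_compact_response response)

-- ===== LEMMAS AND PROOFS =====

def pcrMkMsg (r : String) (c : List String) : List (String × String) :=
  [("role", PySem.Str.lower r), ("content", PySem.Str.join "\n" c)]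

-- A's trailing flush, as a function of the final loop state
def pcrFinish (st : List (List (String × String)) × Option String × List String) :
    List (List (String × String)) :=
  match st with
  | (messages, some r, content) =>
    if r ≠ "" ∧ content ≠ [] then messages ++ [pcrMkMsg r content] else messages
  | (messages, none, _) => messages

def pcrLines (raws : List String) : List String :=
  (raws.map PySem.Str.strip).filter (fun s => s != "")

theorem pcr_go_m0 (sep l cur : List Char) (acc : List (List Char)) (fuel : Nat) :
    PySem.Chars.splitOnMax.go sep fuel 0 l cur acc = ((cur.reverse ++ l) :: acc).reverse := by
  cases fuel with
  | zero => simp [PySem.Chars.splitOnMax.go]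
  | succ f => cases l <;> simp [PySem.Chars.splitOnMax.go]

theorem pcr_go_colon (pre : List Char) : ∀ (fuel : Nat) (rest cur : List Char)
    (acc : List (List Char)), ':' ∉ pre → pre.length < fuel →
    PySem.Chars.splitOnMax.go [':'] fuel 1 (pre ++ ':' :: rest) cur acc =
      acc.reverse ++ [cur.reverse ++ pre, rest] := by
  induction pre with
  | nil =>
    intro fuel rest cur acc _ hf
    cases fuel with
    | zero => omega
    | succ f => simp [PySem.Chars.splitOnMax.go, pcr_go_m0]
  | cons c pre ih =>
    intro fuel rest cur acc hc hf
    cases fuel with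
    | zero => omega
    | succ f =>
      have hcne : c ≠ ':' := by intro h; exact hc (by simp [h])
      have : List.isPrefixOf [':'] (c :: (pre ++ ':' :: rest)) = false := by
        simp [List.isPrefixOf]; exact fun h => absurd h.symm hcne
      simp only [List.cons_append, PySem.Chars.splitOnMax.go, this, Bool.false_eq_true, if_false,
        if_neg (by omega : ¬ (1 : Nat) = 0)]
      rw [ih f rest (c :: cur) acc (fun h => hc (List.mem_cons_of_mem _ h)) (by simpa using Nat.lt_of_succ_lt_succ hf)]
      simp

theorem pcr_split_one (l : String) (pre : List Char) (hpre : ':' ∉ pre)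
    (h : PySem.Str.startswith l (String.ofList (pre ++ [':'])) = true) :
    (PySem.Str.splitMax? l ":" 1).getD [] =
      [String.ofList pre, String.ofList (l.toList.drop (pre.length + 1))] := by
  rw [PySem.Str.startswith_eq] at h
  rw [PySem.Chars.startswith_iff] at h
  obtain ⟨rest, hrest⟩ := h
  have hl : l.toList = pre ++ ':' :: rest := by
    rw [← hrest]; simp [String.toList_ofList]
  rw [PySem.Str.splitMax?]
  rw [PySem.Chars.splitMax?]
  simp only [hl]
  rw [show (":".toList) = [':'] from rfl]
  simp only [List.isEmpty_cons]
  rw [PySem.Chars.splitOnMax]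
  simp only [if_neg (by omega : ¬ (1:Int) < 0)]
  rw [show ((1:Int).toNat) = 1 from rfl]
  rw [pcr_go_colon pre _ rest [] [] hpre (by simp)]
  simp

theorem pcr_split_head (l : String) (h : pcrIsHead l = true) :
    ∃ r x, (PySem.Str.splitMax? l ":" 1).getD [] = [r, x] ∧
      (r = "SYSTEM" ∨ r = "USER" ∨ r = "ASSISTANT") := by
  have e1 : String.ofList ("SYSTEM".toList ++ [':']) = "SYSTEM:" := by decide
  have e2 : String.ofList ("USER".toList ++ [':']) = "USER:" := by decide
  have e3 : String.ofList ("ASSISTANT".toList ++ [':']) = "ASSISTANT:" := by decide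
  have r1 : String.ofList "SYSTEM".toList = "SYSTEM" := by decide
  have r2 : String.ofList "USER".toList = "USER" := by decide
  have r3 : String.ofList "ASSISTANT".toList = "ASSISTANT" := by decide
  unfold pcrIsHead at h
  simp only [Bool.or_eq_true] at h
  rcases h with (h | h) | h
  · exact ⟨_, _, pcr_split_one l "SYSTEM".toList (by decide) (by rw [e1]; exact h), .inl r1⟩
  · exact ⟨_, _, pcr_split_one l "USER".toList (by decide) (by rw [e2]; exact h), .inr (.inl r2)⟩
  · exact ⟨_, _, pcr_split_one l "ASSISTANT".toList (by decide) (by rw [e3]; exact h), .inr (.inr r3)⟩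

-- after a header line the state is (msgs, some role, [inline.strip()]): the rest of the fold
-- produces that message extended with the span body, then the remaining segments
theorem pcrRun_some (raws : List String) : ∀ (msgs : List (List (String × String)))
    (r : String) (c : List String), r ≠ "" → c ≠ [] →
    pcrFinish (raws.foldl pcrStepA (msgs, some r, c)) =
      msgs ++ pcrMkMsg r (c ++ (pcrSpan (pcrLines raws)).1)
        :: pcrSegments (pcrSpan (pcrLines raws)).2 := by
  induction raws with
  | nil =>
    intro msgs r c hr hc
    simp [pcrLines, pcrSpan, pcrSegments, pcrFinish, hr, hc]
  | cons raw raws ih =>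
    intro msgs r c hr hc
    by_cases hl : PySem.Str.strip raw = ""
    · have hstep : pcrStepA (msgs, some r, c) raw = (msgs, some r, c) := by
        simp [pcrStepA, hl]
      have hlines : pcrLines (raw :: raws) = pcrLines raws := by simp [pcrLines, hl]
      simp only [List.foldl_cons, hstep, hlines]
      exact ih msgs r c hr hc
    · by_cases hh : pcrIsHead (PySem.Str.strip raw) = true
      · obtain ⟨r', x, hparts, hroles⟩ := pcr_split_head _ hh
        have hr' : r' ≠ "" := by rcases hroles with h | h | h <;> simp [h]
        have hstep : pcrStepA (msgs, some r, c) raw =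
            (msgs ++ [pcrMkMsg r c], some r', [PySem.Str.strip x]) := by
          simp [pcrStepA, hl, hh, hparts, pcrMkMsg, hr, hc]
        have hlines : pcrLines (raw :: raws) = PySem.Str.strip raw :: pcrLines raws := by
          simp [pcrLines, hl]
        have hspan : pcrSpan (PySem.Str.strip raw :: pcrLines raws) =
            ([], PySem.Str.strip raw :: pcrLines raws) := by simp [pcrSpan, hh]
        have hseg : pcrSegments (PySem.Str.strip raw :: pcrLines raws) =
            pcrMkMsg r' (PySem.Str.strip x :: (pcrSpan (pcrLines raws)).1)
              :: pcrSegments (pcrSpan (pcrLines raws)).2 := by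
          rw [pcrSegments.eq_def]
          simp only [hparts]
          simp [pcrMkMsg]
        simp only [List.foldl_cons, hstep, hlines, hspan, hseg]
        rw [ih (msgs ++ [pcrMkMsg r c]) r' [PySem.Str.strip x] hr' (by simp)]
        simp
      · have hstep : pcrStepA (msgs, some r, c) raw =
            (msgs, some r, c ++ [PySem.Str.strip raw]) := by
          simp [pcrStepA, hl, hh, hr]
        have hlines : pcrLines (raw :: raws) = PySem.Str.strip raw :: pcrLines raws := by
          simp [pcrLines, hl]
        have hspan : pcrSpan (PySem.Str.strip raw :: pcrLines raws) =
            (PySem.Str.strip raw :: (pcrSpan (pcrLines raws)).1, (pcrSpan (pcrLines raws)).2) := by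
          simp [pcrSpan, hh]
        simp only [List.foldl_cons, hstep, hlines, hspan]
        rw [ih msgs r (c ++ [PySem.Str.strip raw]) hr (by simp)]
        simp

-- before the first header the fold just drops lines
theorem pcrRun_none (raws : List String) : ∀ (msgs : List (List (String × String)))
    (c : List String),
    pcrFinish (raws.foldl pcrStepA (msgs, none, c)) =
      msgs ++ pcrSegments (pcrDrop (pcrLines raws)) := by
  induction raws with
  | nil =>
    intro msgs c
    simp [pcrLines, pcrDrop, pcrSegments, pcrFinish]
  | cons raw raws ih =>
    intro msgs c
    by_cases hl : PySem.Str.strip raw = ""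
    · have hstep : pcrStepA (msgs, none, c) raw = (msgs, none, c) := by
        simp [pcrStepA, hl]
      have hlines : pcrLines (raw :: raws) = pcrLines raws := by simp [pcrLines, hl]
      simp only [List.foldl_cons, hstep, hlines]
      exact ih msgs c
    · by_cases hh : pcrIsHead (PySem.Str.strip raw) = true
      · obtain ⟨r', x, hparts, hroles⟩ := pcr_split_head _ hh
        have hr' : r' ≠ "" := by rcases hroles with h | h | h <;> simp [h]
        have hstep : pcrStepA (msgs, none, c) raw = (msgs, some r', [PySem.Str.strip x]) := by
          simp [pcrStepA, hl, hh, hparts]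
        have hlines : pcrLines (raw :: raws) = PySem.Str.strip raw :: pcrLines raws := by
          simp [pcrLines, hl]
        have hdrop : pcrDrop (PySem.Str.strip raw :: pcrLines raws) =
            PySem.Str.strip raw :: pcrLines raws := by simp [pcrDrop, hh]
        have hseg : pcrSegments (PySem.Str.strip raw :: pcrLines raws) =
            pcrMkMsg r' (PySem.Str.strip x :: (pcrSpan (pcrLines raws)).1)
              :: pcrSegments (pcrSpan (pcrLines raws)).2 := by
          rw [pcrSegments.eq_def]
          simp only [hparts]
          simp [pcrMkMsg]
        simp only [List.foldl_cons, hstep, hlines, hdrop, hseg]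
        rw [pcrRun_some raws msgs r' [PySem.Str.strip x] hr' (by simp)]
        simp
      · have hstep : pcrStepA (msgs, none, c) raw = (msgs, none, c) := by
          simp [pcrStepA, hl, hh]
        have hlines : pcrLines (raw :: raws) = PySem.Str.strip raw :: pcrLines raws := by
          simp [pcrLines, hl]
        have hdrop : pcrDrop (PySem.Str.strip raw :: pcrLines raws) = pcrDrop (pcrLines raws) := by
          simp [pcrDrop, hh]
        simp only [List.foldl_cons, hstep, hlines, hdrop]
        exact ih msgs c

-- ===== VERDICT (by name: the statement is the Claim_ definition above) =====
theorem parse_compact_response_spec : Claim_equal_parse_compact_response := by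
  intro response _
  show parse_compact_response response = parse_compact_response_alt response
  have h := pcrRun_none (PySem.Str.splitlines response) [] []
  simpa [parse_compact_response, parse_compact_response_alt, pcrFinish, pcrLines] using h
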